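-- pv_equiv track=rewrite | github.com/assafb07/lpi | LPIExam.py | headers
-- ===== SOURCE A (Python) =====
-- def headers(text):
--     """function scans question header from text"""
--     headerlist = []
--     header = """"""
--     listex = ["Ex", "A.", "B.", "C.", "D.", "E."]
--     for line in text:
--         if len(line) < 3 or line[0:2] in listex:
--             if len(header) >= 1:
--                 headerlist.append(header)
--                 header = """"""
--         else:
--             header = header + line
--     return headerlist
-- ===== SOURCE B (Python) =====
-- def headers(text):
--     """function scans question header from text"""
--     listex = ("Ex", "A.", "B.", "C.", "D.", "E.")
--     lines = list(text)
--     n = len(lines)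
--     out = []
--     i = 0
--     while i < n:
--         # advance j to the next separator line (short line or listed prefix)
--         j = i
--         while j < n and not (len(lines[j]) < 3 or lines[j][0:2] in listex):
--             j += 1
--         if j == n:
--             break  # trailing content run has no terminating separator: no header
--         if j > i:
--             out.append(''.join(lines[i:j]))
--         i = j + 1
--     return out
-- ===== Notes on version B (the rewrite author's own statement) =====
-- stated objective: alternative
-- what changed: A accumulates a growing header string and flushes it at each separator line; B scans two-pointer style for maximal runs of content lines ended by a separator and joins each run's slice in one step, never keeping a partial-header string.
import Mathlib
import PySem

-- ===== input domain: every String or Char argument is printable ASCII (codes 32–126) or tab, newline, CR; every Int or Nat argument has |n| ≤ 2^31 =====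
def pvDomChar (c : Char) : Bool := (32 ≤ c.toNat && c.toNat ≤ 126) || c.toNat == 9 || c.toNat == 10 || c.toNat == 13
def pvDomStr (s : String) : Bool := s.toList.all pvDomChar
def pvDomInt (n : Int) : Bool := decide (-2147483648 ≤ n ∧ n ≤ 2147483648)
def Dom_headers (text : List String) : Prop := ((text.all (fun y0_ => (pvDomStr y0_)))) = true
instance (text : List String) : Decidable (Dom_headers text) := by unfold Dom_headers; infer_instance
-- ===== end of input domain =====

-- B replaces A's flush-on-separator string accumulator by a two-pointer scan over maximal
-- content runs terminated by a separator (objective: alternative decomposition, same cost).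

-- shared separator test: 'len(line) < 3 or line[0:2] in listex' (the same boolean expression in both Pythons)
def pvIsSep (line : String) : Bool :=
  decide (PySem.Str.len line < 3) || ["Ex", "A.", "B.", "C.", "D.", "E."].contains (PySem.Str.slice line (some 0) (some 2))

-- ===== PORT A =====
def headersStep (s : List String × String) (line : String) : List String × String :=
  if pvIsSep line then
    if 1 ≤ PySem.Str.len s.2 then (s.1 ++ [s.2], "") else s
  else
    (s.1, s.2 ++ line)

def headers (text : List String) : List String :=
  (text.foldl headersStep ([], "")).1

-- ===== PORT B =====
-- Source B's outer while advances i past each separator; ported as recursion on the remaining suffix: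
-- the inner 'while j < n and not is_sep(lines[j])' is the takeWhile/dropWhile split at the next
-- separator, 'if j == n: break' is the isEmpty test, ''.join(lines[i:j]) is the join of the run.
def headersAltGo (ls : List String) : List String :=
  let rest := ls.dropWhile (fun l => !pvIsSep l)
  if hrest : rest.isEmpty then []
  else
    (if (ls.takeWhile (fun l => !pvIsSep l)).isEmpty then []
     else [PySem.Str.join "" (ls.takeWhile (fun l => !pvIsSep l))]) ++ headersAltGo rest.tail
termination_by ls.length
decreasing_by
  have h1 := List.length_dropWhile_le (fun l => !pvIsSep l) ls
  have h2 : rest ≠ [] := by simpa [List.isEmpty_iff] using hrest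
  have h3 : rest.length ≤ ls.length := h1
  have h4 := List.length_pos_of_ne_nil h2
  simp only [List.length_tail]
  omega

def headers_alt (text : List String) : List String := headersAltGo text

-- ===== PRECONDITION & SPEC =====
def Spec_headers (text : List String) (out : List String) : Prop := out = headers_alt text
instance (text : List String) (out : List String) : Decidable (Spec_headers text out) := by unfold Spec_headers; infer_instance

-- ===== CLAIM (what is proved, stated in full; the proofs are below) =====
def Claim_equal_headers : Prop := ∀ (text : List String), Dom_headers text → Spec_headers text (headers text)

-- ===== LEMMAS AND PROOFS =====

-- A's loop, written as recursion on the lines with the pending header as parameter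
def goA (hd : String) : List String → List String
  | [] => []
  | l :: ls =>
    if pvIsSep l then (if 1 ≤ PySem.Str.len hd then [hd] else []) ++ goA "" ls
    else goA (hd ++ l) ls

lemma str_empty_of_not_len (hd : String) (hh : ¬ 1 ≤ PySem.Str.len hd) : hd = "" := by
  rw [PySem.Str.len_eq] at hh
  have h0 : hd.toList.length = 0 := by omega
  apply String.toList_injective
  simp [List.eq_nil_of_length_eq_zero h0]

lemma foldA_eq (ls : List String) : ∀ (acc : List String) (hd : String),
    (ls.foldl headersStep (acc, hd)).1 = acc ++ goA hd ls := by
  induction ls with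
  | nil => intro acc hd; simp [goA]
  | cons l ls ih =>
    intro acc hd
    by_cases hs : pvIsSep l = true
    · by_cases hh : 1 ≤ PySem.Str.len hd
      · simp only [List.foldl_cons, headersStep, hs, if_true, goA, if_pos hh]
        rw [ih]; simp
      · simp only [List.foldl_cons, headersStep, hs, if_true, goA, if_neg hh]
        rw [ih, str_empty_of_not_len hd hh]; simp
    · simp only [List.foldl_cons, headersStep, hs, Bool.false_eq_true, if_false, goA]
      · exact ih acc (hd ++ l)

lemma join_nil_cons (p : List Char) (rest : List (List Char)) :
    PySem.Chars.join [] (p :: rest) = p ++ PySem.Chars.join [] rest := by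
  cases rest with
  | nil => simp [PySem.Chars.join_singleton, PySem.Chars.join_nil]
  | cons q r => rw [PySem.Chars.join_cons_cons]; simp

lemma strJoin_nil_cons (p : String) (rest : List String) :
    PySem.Str.join "" (p :: rest) = p ++ PySem.Str.join "" rest := by
  apply String.toList_injective
  simp [PySem.Str.toList_join, join_nil_cons]

lemma len_nonsep (l : String) (h : pvIsSep l = false) : 3 ≤ l.length := by
  unfold pvIsSep at h
  simp [PySem.Str.len_eq] at h
  omega

-- length condition on the flushed string, in terms of the run being nonempty
lemma flush_cond (run : List String) (hrun : ∀ l ∈ run, pvIsSep l = false) :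
    (1 ≤ PySem.Str.len (PySem.Str.join "" run)) ↔ ¬ run.isEmpty := by
  cases run with
  | nil =>
    simp [PySem.Str.len_eq, PySem.Str.toList_join, PySem.Chars.join_nil]
  | cons r rest =>
    have h3 := len_nonsep r (hrun r (by simp))
    simp [strJoin_nil_cons, PySem.Str.len_eq]
    omega

-- B's recursion restated with A's flush condition
lemma altGo_eq (ls : List String) :
    headersAltGo ls =
      if (ls.dropWhile (fun l => !pvIsSep l)).isEmpty then []
      else
        (if 1 ≤ PySem.Str.len (PySem.Str.join "" (ls.takeWhile (fun l => !pvIsSep l))) then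
          [PySem.Str.join "" (ls.takeWhile (fun l => !pvIsSep l))] else []) ++
        headersAltGo (ls.dropWhile (fun l => !pvIsSep l)).tail := by
  have hrun : ∀ l ∈ ls.takeWhile (fun l => !pvIsSep l), pvIsSep l = false := by
    intro l hl
    have := List.mem_takeWhile_imp hl
    simpa using this
  rw [headersAltGo]
  simp only [flush_cond _ hrun]
  by_cases he : (ls.dropWhile (fun l => !pvIsSep l)).isEmpty
  · simp [he]
  · by_cases ht : (ls.takeWhile (fun l => !pvIsSep l)).isEmpty <;> simp [he, ht]

lemma goA_eq (ls : List String) : ∀ (hd : String),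
    goA hd ls =
      if (ls.dropWhile (fun l => !pvIsSep l)).isEmpty then []
      else
        (if 1 ≤ PySem.Str.len (hd ++ PySem.Str.join "" (ls.takeWhile (fun l => !pvIsSep l))) then
          [hd ++ PySem.Str.join "" (ls.takeWhile (fun l => !pvIsSep l))] else []) ++
        headersAltGo (ls.dropWhile (fun l => !pvIsSep l)).tail := by
  induction ls with
  | nil => intro hd; simp [goA]
  | cons l ls ih =>
    intro hd
    by_cases hs : pvIsSep l = true
    · have hdw : (l :: ls).dropWhile (fun l => !pvIsSep l) = l :: ls := by
        simp [hs]
      have htw : (l :: ls).takeWhile (fun l => !pvIsSep l) = [] := by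
        simp [hs]
      have hgo : goA "" ls = headersAltGo ls := by
        rw [ih "", altGo_eq ls]
        by_cases he : (ls.dropWhile (fun l => !pvIsSep l)).isEmpty
        · simp [he]
        · have : ("" : String) ++ PySem.Str.join "" (ls.takeWhile (fun l => !pvIsSep l)) =
              PySem.Str.join "" (ls.takeWhile (fun l => !pvIsSep l)) := by
            apply String.toList_injective; simp
          rw [this]
      rw [hdw, htw]
      have hemp : hd ++ PySem.Str.join "" ([] : List String) = hd := by
        apply String.toList_injective
        simp [PySem.Str.toList_join, PySem.Chars.join_nil]
      rw [hemp]
      simp only [goA, hs, if_true, hgo, List.isEmpty_cons, List.tail_cons, Bool.false_eq_true,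
        if_false]
    · have hs' : pvIsSep l = false := by simpa using hs
      have hdw : (l :: ls).dropWhile (fun l => !pvIsSep l) = ls.dropWhile (fun l => !pvIsSep l) := by
        simp [hs']
      have htw : (l :: ls).takeWhile (fun l => !pvIsSep l) =
          l :: ls.takeWhile (fun l => !pvIsSep l) := by
        simp [hs']
      have hassoc : hd ++ PySem.Str.join "" (l :: ls.takeWhile (fun l => !pvIsSep l)) =
          (hd ++ l) ++ PySem.Str.join "" (ls.takeWhile (fun l => !pvIsSep l)) := by
        rw [strJoin_nil_cons]
        apply String.toList_injective; simp
      rw [hdw, htw, hassoc]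
      simp only [goA, hs', Bool.false_eq_true, if_false]
      exact ih (hd ++ l)

-- ===== VERDICT (by name: the statement is the Claim_ definition above) =====
theorem headers_spec : Claim_equal_headers := by
  intro text _
  unfold Spec_headers headers headers_alt
  rw [foldA_eq text [] "", goA_eq text "", altGo_eq text]
  by_cases he : (text.dropWhile (fun l => !pvIsSep l)).isEmpty
  · simp [he]
  · have : ("" : String) ++ PySem.Str.join "" (text.takeWhile (fun l => !pvIsSep l)) =
        PySem.Str.join "" (text.takeWhile (fun l => !pvIsSep l)) := by
      apply String.toList_injective; simp
    rw [this]
    simp
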